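-- pv_equiv track=rewrite | github.com/agrc/AmdButler | zipper.py | generate_params_txt
-- ===== SOURCE A (Python) =====
-- def generate_params_txt(pairs, indent, oneLine):
--     package = None
--
--     # normal settings:
--     initialTxt = ''
--     endLineTxt = ',\n'
--     afterItemTxt = ','
--     everyIterTxt = '\n' + indent
--
--     # config setting of params on one line:
--     if oneLine is True:
--         initialTxt = '\n' + indent
--         endLineTxt = ',\n' + indent
--         afterItemTxt = ', '
--         everyIterTxt = ''
--
--     txt = initialTxt
--
--     for p in pairs:
--         new_package = p[0].split('/')[0]
--         if not p[1] is None: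
--             if package is None:
--                 package = new_package
--             elif package != new_package:
--                 txt += endLineTxt
--                 package = new_package
--             else:
--                 txt += afterItemTxt
--
--             txt += everyIterTxt + p[1]
--
--     txt += '\n'
--
--     return txt
-- ===== SOURCE B (Python) =====
-- def generate_params_txt(pairs, indent, oneLine):
--     if oneLine is True:
--         initial, endline, afteritem, everyiter = '\n' + indent, ',\n' + indent, ', ', ''
--     else:
--         initial, endline, afteritem, everyiter = '', ',\n', ',', '\n' + indent
--
--     # keep only set parameters, tagged with their package prefix
--     items = [(p[0].split('/')[0], p[1]) for p in pairs if p[1] is not None]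
--
--     # group consecutive items into runs of equal package prefix
--     runs = []
--     for pref, val in items:
--         if runs and runs[-1][0] == pref:
--             runs[-1][1].append(val)
--         else:
--             runs.append((pref, [val]))
--
--     sep = afteritem + everyiter
--     body = endline.join(everyiter + sep.join(vals) for _, vals in runs)
--     return initial + body + '\n'
-- ===== Notes on version B (the rewrite author's own statement) =====
-- stated objective: simpler
-- what changed: Replaces A's stateful conditional-separator accumulator (tracking the previous package and choosing which separator to emit per item) by an explicit pipeline: filter to the set items with their package prefix, group consecutive items into runs of equal prefix, then render each run with one join and join the runs with another.
import Mathlib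
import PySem

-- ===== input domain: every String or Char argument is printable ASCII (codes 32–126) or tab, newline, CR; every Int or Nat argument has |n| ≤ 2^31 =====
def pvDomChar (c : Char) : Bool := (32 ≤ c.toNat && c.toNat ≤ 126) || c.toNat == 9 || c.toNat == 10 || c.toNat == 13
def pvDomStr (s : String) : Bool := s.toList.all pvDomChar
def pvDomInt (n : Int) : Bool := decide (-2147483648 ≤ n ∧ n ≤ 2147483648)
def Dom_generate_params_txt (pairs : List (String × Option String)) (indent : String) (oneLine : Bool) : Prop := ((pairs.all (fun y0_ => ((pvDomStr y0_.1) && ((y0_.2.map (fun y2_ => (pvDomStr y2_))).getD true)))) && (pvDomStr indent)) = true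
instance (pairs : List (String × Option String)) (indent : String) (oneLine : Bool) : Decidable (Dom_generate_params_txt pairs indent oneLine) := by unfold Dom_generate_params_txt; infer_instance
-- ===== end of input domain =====

-- B replaces A's stateful conditional-separator accumulator by filtering the set items,
-- grouping them into consecutive runs of equal package prefix, and joining at two levels
-- (objective: simpler decomposition; same cost).

-- ===== PORT A =====

-- p[0].split('/')[0]: split with a non-empty separator always yields a non-empty list,
-- so the subscript [0] is exactly its head and never raises.
def pkgPrefix (s : String) : String := ((PySem.Str.split? s "/").getD []).headD ""

-- the for-loop of A, state = (package, txt)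
def goA (endLineTxt afterItemTxt everyIterTxt : String) :
    Option String → String → List (String × Option String) → String
  | _, txt, [] => txt ++ "\n"
  | package, txt, p :: rest =>
    let new_package := pkgPrefix p.1
    match p.2 with
    | none => goA endLineTxt afterItemTxt everyIterTxt package txt rest
    | some v =>
      match package with
      | none =>
          goA endLineTxt afterItemTxt everyIterTxt (some new_package)
            (txt ++ (everyIterTxt ++ v)) rest
      | some pkg =>
          if pkg ≠ new_package then
            goA endLineTxt afterItemTxt everyIterTxt (some new_package)
              ((txt ++ endLineTxt) ++ (everyIterTxt ++ v)) rest
          else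
            goA endLineTxt afterItemTxt everyIterTxt (some pkg)
              ((txt ++ afterItemTxt) ++ (everyIterTxt ++ v)) rest

def generate_params_txt (pairs : List (String × Option String)) (indent : String) (oneLine : Bool) : String :=
  let initialTxt := if oneLine then "\n" ++ indent else ""
  let endLineTxt := if oneLine then ",\n" ++ indent else ",\n"
  let afterItemTxt := if oneLine then ", " else ","
  let everyIterTxt := if oneLine then "" else "\n" ++ indent
  goA endLineTxt afterItemTxt everyIterTxt none initialTxt pairs

-- ===== PORT B =====

-- [(p[0].split('/')[0], p[1]) for p in pairs if p[1] is not None]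
def altItems (pairs : List (String × Option String)) : List (String × String) :=
  pairs.filterMap (fun p => p.2.map (fun v => (pkgPrefix p.1, v)))

-- loop body: append val to the last run if its prefix matches, else start a new run
def altAdd : List (String × List String) → String → String → List (String × List String)
  | [], pref, val => [(pref, [val])]
  | [r], pref, val => if r.1 = pref then [(r.1, r.2 ++ [val])] else [r, (pref, [val])]
  | r :: rs, pref, val => r :: altAdd rs pref val

def generate_params_txt_alt (pairs : List (String × Option String)) (indent : String) (oneLine : Bool) : String :=
  let initial := if oneLine then "\n" ++ indent else ""
  let endline := if oneLine then ",\n" ++ indent else ",\n"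
  let afteritem := if oneLine then ", " else ","
  let everyiter := if oneLine then "" else "\n" ++ indent
  let items := altItems pairs
  let runs := items.foldl (fun rs it => altAdd rs it.1 it.2) []
  let sep := afteritem ++ everyiter
  let body := PySem.Str.join endline (runs.map (fun r => everyiter ++ PySem.Str.join sep r.2))
  initial ++ body ++ "\n"

-- ===== PRECONDITION & SPEC =====
def Spec_generate_params_txt (pairs : List (String × Option String)) (indent : String) (oneLine : Bool) (out : String) : Prop := out = generate_params_txt_alt pairs indent oneLine
instance (pairs : List (String × Option String)) (indent : String) (oneLine : Bool) (out : String) : Decidable (Spec_generate_params_txt pairs indent oneLine out) := by unfold Spec_generate_params_txt; infer_instance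

-- ===== CLAIM (what is proved, stated in full; the proofs are below) =====
def Claim_equal_generate_params_txt : Prop := ∀ (pairs : List (String × Option String)) (indent : String) (oneLine : Bool), Dom_generate_params_txt pairs indent oneLine → Spec_generate_params_txt pairs indent oneLine (generate_params_txt pairs indent oneLine)

-- ===== LEMMAS AND PROOFS =====

-- the package prefix of the last run (state A's `package` variable tracks)
def lastPrefix : List (String × List String) → Option String
  | [] => none
  | [r] => some r.1
  | _ :: rs => lastPrefix rs

def render (endline afteritem everyiter : String) (runs : List (String × List String)) : String :=
  PySem.Str.join endline (runs.map (fun r => everyiter ++ PySem.Str.join (afteritem ++ everyiter) r.2))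

theorem join_cons_of_ne_nil (sep x : String) (xs : List String) (h : xs ≠ []) :
    PySem.Str.join sep (x :: xs) = x ++ sep ++ PySem.Str.join sep xs := by
  cases xs with
  | nil => exact absurd rfl h
  | cons y ys =>
    apply String.toList_injective
    simp [PySem.Str.toList_join, PySem.Chars.join_cons_cons, String.toList_append]

theorem str_join_nil (sep : String) : PySem.Str.join sep [] = "" := by
  apply String.toList_injective
  simp [PySem.Str.toList_join, PySem.Chars.join_nil]

theorem str_join_singleton (sep x : String) : PySem.Str.join sep [x] = x := by
  apply String.toList_injective
  simp [PySem.Str.toList_join, PySem.Chars.join_singleton]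

theorem join_append_singleton (sep : String) (xs : List String) (x : String) (h : xs ≠ []) :
    PySem.Str.join sep (xs ++ [x]) = PySem.Str.join sep xs ++ sep ++ x := by
  induction xs with
  | nil => exact absurd rfl h
  | cons y ys ih =>
    cases ys with
    | nil =>
      apply String.toList_injective
      simp [PySem.Str.toList_join, PySem.Chars.join_cons_cons, PySem.Chars.join_singleton,
        String.toList_append]
    | cons z zs =>
      rw [List.cons_append, join_cons_of_ne_nil sep y (z :: zs ++ [x]) (by simp),
        join_cons_of_ne_nil sep y (z :: zs) (by simp), ih (by simp)]
      simp [String.append_assoc]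

theorem render_cons_of_ne_nil (e a i : String) (r : String × List String)
    (rs : List (String × List String)) (h : rs ≠ []) :
    render e a i (r :: rs) =
      (i ++ PySem.Str.join (a ++ i) r.2) ++ e ++ render e a i rs := by
  unfold render
  rw [List.map_cons, join_cons_of_ne_nil]
  simpa using h

theorem altAdd_ne_nil (runs : List (String × List String)) (p v : String) :
    altAdd runs p v ≠ [] := by
  induction runs with
  | nil => simp [altAdd]
  | cons r rs ih =>
    cases rs with
    | nil => unfold altAdd; split <;> simp
    | cons r' rs' => simp [altAdd]

theorem altAdd_runs_ne_nil (runs : List (String × List String)) (p v : String)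
    (h : ∀ r ∈ runs, r.2 ≠ []) : ∀ r ∈ altAdd runs p v, r.2 ≠ [] := by
  induction runs with
  | nil => simp [altAdd]
  | cons r rs ih =>
    cases rs with
    | nil =>
      intro q hq
      unfold altAdd at hq
      split at hq
      case isTrue hr =>
        simp only [List.mem_cons, List.not_mem_nil, or_false] at hq
        subst hq; simp
      case isFalse hr =>
        simp only [List.mem_cons, List.not_mem_nil, or_false] at hq
        rcases hq with rfl | rfl
        · exact h _ (by simp)
        · simp
    | cons r' rs' =>
      intro q hq
      simp only [altAdd, List.mem_cons] at hq
      rcases hq with hq | hq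
      · subst hq; exact h q (by simp)
      · exact ih (fun s hs => h s (by simp [hs])) q hq

theorem lastPrefix_altAdd (runs : List (String × List String)) (p v : String) :
    lastPrefix (altAdd runs p v) = some p := by
  induction runs with
  | nil => simp [altAdd, lastPrefix]
  | cons r rs ih =>
    cases rs with
    | nil =>
      unfold altAdd
      split
      · rename_i hr; simp [lastPrefix, hr]
      · simp [lastPrefix]
    | cons r' rs' =>
      have h := altAdd_ne_nil (r' :: rs') p v
      simp only [altAdd]
      cases hx : altAdd (r' :: rs') p v with
      | nil => exact absurd hx h
      | cons s ss => rw [← hx]; simp only [lastPrefix]; rw [hx] at ih ⊢; exact ih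

theorem render_altAdd (e a i : String) (runs : List (String × List String)) (p v : String)
    (h : ∀ r ∈ runs, r.2 ≠ []) :
    render e a i (altAdd runs p v) =
      render e a i runs ++
        (match lastPrefix runs with
         | none => ""
         | some q => if q = p then a else e) ++ (i ++ v) := by
  induction runs with
  | nil =>
    simp only [altAdd, lastPrefix, render, List.map_nil, List.map_cons, str_join_nil,
      str_join_singleton, String.empty_append, String.append_empty]
  | cons r rs ih =>
    cases rs with
    | nil =>
      unfold altAdd
      split
      · rename_i hr
        have hr2 : r.2 ≠ [] := h r (by simp)
        simp only [lastPrefix, if_pos hr, render, List.map_cons, List.map_nil,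
          str_join_singleton]
        rw [join_append_singleton (a ++ i) r.2 v hr2]
        simp [String.append_assoc]
      · rename_i hr
        simp only [lastPrefix, if_neg hr]
        rw [render_cons_of_ne_nil e a i r [(p, [v])] (by simp)]
        simp only [render, List.map_cons, List.map_nil, str_join_singleton,
          String.append_assoc]
    | cons r' rs' =>
      simp only [altAdd]
      rw [render_cons_of_ne_nil e a i r _ (altAdd_ne_nil _ p v),
          render_cons_of_ne_nil e a i r _ (by simp),
          ih (fun s hs => h s (by simp [hs]))]
      simp only [lastPrefix, String.append_assoc]

theorem goA_render (e a i : String) (pairs : List (String × Option String))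
    (runs : List (String × List String)) (txt0 : String)
    (h : ∀ r ∈ runs, r.2 ≠ []) :
    goA e a i (lastPrefix runs) (txt0 ++ render e a i runs) pairs =
      txt0 ++ render e a i ((altItems pairs).foldl (fun rs it => altAdd rs it.1 it.2) runs) ++ "\n" := by
  induction pairs generalizing runs with
  | nil => simp [goA, altItems, String.append_assoc]
  | cons p rest ih =>
    cases hv : p.2 with
    | none =>
      have : altItems (p :: rest) = altItems rest := by simp [altItems, hv]
      rw [this]
      simpa [goA, hv] using ih runs h
    | some v =>
      have hitems : altItems (p :: rest) = (pkgPrefix p.1, v) :: altItems rest := by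
        simp [altItems, hv]
      rw [hitems, List.foldl_cons]
      have key : txt0 ++ render e a i runs ++
            ((match lastPrefix runs with
              | none => ""
              | some q => if q = pkgPrefix p.1 then a else e) ++ (i ++ v)) =
          txt0 ++ render e a i (altAdd runs (pkgPrefix p.1) v) := by
        rw [render_altAdd e a i runs (pkgPrefix p.1) v h]
        simp [String.append_assoc]
      have h' := altAdd_runs_ne_nil runs (pkgPrefix p.1) v h
      have ihn := ih (altAdd runs (pkgPrefix p.1) v) h'
      rw [lastPrefix_altAdd] at ihn
      cases hlp : lastPrefix runs with
      | none =>
        simp only [goA, hv]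
        rw [show txt0 ++ render e a i runs ++ (i ++ v) =
              txt0 ++ render e a i (altAdd runs (pkgPrefix p.1) v) by
            simpa [hlp, String.append_assoc] using key]
        exact ihn
      | some q =>
        by_cases hq : q = pkgPrefix p.1
        · simp only [goA, hv, if_neg (by simp [hq] : ¬ q ≠ pkgPrefix p.1)]
          rw [show txt0 ++ render e a i runs ++ a ++ (i ++ v) =
                txt0 ++ render e a i (altAdd runs (pkgPrefix p.1) v) by
              simpa [hlp, hq, String.append_assoc] using key]
          rw [show (some q) = some (pkgPrefix p.1) by rw [hq]]
          exact ihn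
        · simp only [goA, hv, if_pos hq]
          rw [show txt0 ++ render e a i runs ++ e ++ (i ++ v) =
                txt0 ++ render e a i (altAdd runs (pkgPrefix p.1) v) by
              simpa [hlp, hq, String.append_assoc] using key]
          exact ihn

-- ===== VERDICT (by name: the statement is the Claim_ definition above) =====
theorem generate_params_txt_spec : Claim_equal_generate_params_txt := by
  intro pairs indent oneLine _
  unfold Spec_generate_params_txt generate_params_txt generate_params_txt_alt
  have h := goA_render (if oneLine then ",\n" ++ indent else ",\n")
      (if oneLine then ", " else ",")
      (if oneLine then "" else "\n" ++ indent) pairs []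
      (if oneLine then "\n" ++ indent else "") (by simp)
  simp only [lastPrefix, render, List.map_nil, str_join_nil, String.append_empty] at h
  simpa [render] using h
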